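-- pv_equiv track=rewrite | github.com/pypi-data/pypi-mirror-331 | packages/flatforge/flatforge-0.1.1.tar.gz/flatforge-0.1.1/flatforge/utils.py | convert_to_maps
-- ===== SOURCE A (Python) =====
-- from typing import Dict, List, Optional, Any, Union, Pattern, Tuple
--
-- def convert_to_maps(text: str) -> Tuple[Dict[str, str], Dict[str, Dict[str, str]]]:
--     """Convert a configuration text to maps."""
--     config = {}
--     arrays = {}
--
--     # Split the text into lines
--     lines = text.splitlines()
--     current_section = None
--
--     for line in lines:
--         line = line.strip()
--
--         # Skip empty lines and comments
--         if not line or line.startswith("#"):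
--             continue
--
--         # Check if this is a section header
--         if line.startswith("[") and line.endswith("]"):
--             current_section = line[1:-1].strip()
--             arrays[current_section] = {}
--             continue
--
--         # Skip lines without a current section
--         if current_section is None:
--             continue
--
--         # Parse key-value pairs
--         if "=" in line:
--             key, value = line.split("=", 1)
--             key = key.strip()
--             value = value.strip()
--
--             if current_section == "parameters":
--                 config[key] = value
--             else:
--                 arrays[current_section][key] = value
--
--     return config, arrays
-- ===== SOURCE B (Python) =====
-- def convert_to_maps(text):
--     """Convert a configuration text to maps (segment-then-fill pipeline)."""
--     # Pass 1: segment the meaningful lines into ordered (section, body_lines) blocks.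
--     blocks = []
--     current = None
--     for raw in text.splitlines():
--         line = raw.strip()
--         if not line or line.startswith("#"):
--             continue
--         if line.startswith("[") and line.endswith("]"):
--             current = (line[1:-1].strip(), [])
--             blocks.append(current)
--         elif current is not None:
--             current[1].append(line)
--     # Pass 2: fill the maps block by block (a later duplicate block overwrites).
--     config = {}
--     arrays = {}
--     for name, body in blocks:
--         section = {}
--         for line in body:
--             if "=" in line:
--                 key, value = line.split("=", 1)
--                 if name == "parameters":
--                     config[key.strip()] = value.strip()
--                 else:
--                     section[key.strip()] = value.strip()
--         arrays[name] = section
--     return config, arrays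
-- ===== Notes on version B (the rewrite author's own statement) =====
-- stated objective: alternative
-- what changed: Replaces A's single interleaved stateful loop (mutating config/arrays per line under a current-section variable) by a two-pass pipeline: first segment the meaningful lines into an ordered list of (section, body_lines) blocks, then fill config/arrays block by block, with a later duplicate block overwriting its section.
import Mathlib
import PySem

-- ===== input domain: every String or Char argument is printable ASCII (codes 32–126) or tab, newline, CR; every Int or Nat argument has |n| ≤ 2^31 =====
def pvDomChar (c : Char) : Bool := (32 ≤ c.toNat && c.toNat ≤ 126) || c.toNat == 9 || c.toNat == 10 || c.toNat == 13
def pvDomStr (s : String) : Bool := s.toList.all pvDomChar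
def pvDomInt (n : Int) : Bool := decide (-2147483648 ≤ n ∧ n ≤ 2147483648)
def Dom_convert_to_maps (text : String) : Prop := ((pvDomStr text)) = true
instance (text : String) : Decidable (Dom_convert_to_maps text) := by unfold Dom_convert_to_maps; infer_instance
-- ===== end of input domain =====

-- B replaces A's single interleaved stateful loop by a segment-then-fill two-pass pipeline (objective: alternative decomposition, same cost).

-- ===== PORT A =====
-- A's loop state: (config, arrays, current_section)
def pvAStep
    (st : PySem.Dict String String × PySem.Dict String (PySem.Dict String String) × Option String)
    (raw : String) :
    PySem.Dict String String × PySem.Dict String (PySem.Dict String String) × Option String :=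
  let line := PySem.Str.strip raw
  if line == "" || PySem.Str.startswith line "#" then st
  else if PySem.Str.startswith line "[" && PySem.Str.endswith line "]" then
    let sec := PySem.Str.strip (PySem.Str.slice line (some 1) (some (-1)))
    (st.1, (st.2.1).insert sec PySem.Dict.empty, some sec)
  else
    match st.2.2 with
    | none => st
    | some s =>
      if PySem.Str.isIn "=" line then
        let parts := (PySem.Str.splitMax? line "=" 1).getD []
        let key := PySem.Str.strip (parts.getD 0 "")
        let value := PySem.Str.strip (parts.getD 1 "")
        if s == "parameters" then ((st.1).insert key value, st.2.1, st.2.2)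
        else (st.1, (st.2.1).modify s PySem.Dict.empty (fun d => d.insert key value), st.2.2)
      else st

def convert_to_maps (text : String) : (List (String × String)) × (List (String × List (String × String))) :=
  let st := (PySem.Str.splitlines text).foldl pvAStep (PySem.Dict.empty, PySem.Dict.empty, none)
  ((st.1).items, (st.2.1).items.map (fun p => (p.1, (p.2).items)))

-- ===== PORT B =====
-- pass 1 state: (closed blocks, open block)
def pvSegStep
    (st : List (String × List String) × Option (String × List String)) (raw : String) :
    List (String × List String) × Option (String × List String) :=
  let line := PySem.Str.strip raw
  if line == "" || PySem.Str.startswith line "#" then st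
  else if PySem.Str.startswith line "[" && PySem.Str.endswith line "]" then
    (st.1 ++ st.2.toList,
     some (PySem.Str.strip (PySem.Str.slice line (some 1) (some (-1))), ([] : List String)))
  else
    match st.2 with
    | none => st
    | some cur => (st.1, some (cur.1, cur.2 ++ [line]))

-- pass 2: one body line into (config, section) for a block named `name`
def pvKVStep (name : String)
    (cs : PySem.Dict String String × PySem.Dict String String) (line : String) :
    PySem.Dict String String × PySem.Dict String String :=
  if PySem.Str.isIn "=" line then
    let parts := (PySem.Str.splitMax? line "=" 1).getD []
    let key := PySem.Str.strip (parts.getD 0 "")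
    let value := PySem.Str.strip (parts.getD 1 "")
    if name == "parameters" then (cs.1.insert key value, cs.2)
    else (cs.1, cs.2.insert key value)
  else cs

-- pass 2: one whole block into (config, arrays)
def pvFillStep
    (acc : PySem.Dict String String × PySem.Dict String (PySem.Dict String String))
    (blk : String × List String) :
    PySem.Dict String String × PySem.Dict String (PySem.Dict String String) :=
  let cs := blk.2.foldl (pvKVStep blk.1) (acc.1, PySem.Dict.empty)
  (cs.1, acc.2.insert blk.1 cs.2)

def convert_to_maps_alt (text : String) : (List (String × String)) × (List (String × List (String × String))) :=
  let seg := (PySem.Str.splitlines text).foldl pvSegStep ([], none)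
  let blocks := seg.1 ++ seg.2.toList
  let res := blocks.foldl pvFillStep (PySem.Dict.empty, PySem.Dict.empty)
  ((res.1).items, (res.2).items.map (fun p => (p.1, (p.2).items)))

-- ===== PRECONDITION & SPEC =====
def Spec_convert_to_maps (text : String) (out : (List (String × String)) × (List (String × List (String × String)))) : Prop := out = convert_to_maps_alt text
instance (text : String) (out : (List (String × String)) × (List (String × List (String × String)))) : Decidable (Spec_convert_to_maps text out) := by unfold Spec_convert_to_maps; infer_instance

-- ===== CLAIM (what is proved, stated in full; the proofs are below) =====
def Claim_equal_convert_to_maps : Prop := ∀ (text : String), Dom_convert_to_maps text → Spec_convert_to_maps text (convert_to_maps text)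

-- ===== LEMMAS AND PROOFS =====

-- proof-side recursive view of pass 1: pvSegP lines cur = blocks still to be produced
def pvSegP : List String → Option (String × List String) → List (String × List String)
  | [], cur => cur.toList
  | raw :: ls, cur =>
    let line := PySem.Str.strip raw
    if line == "" || PySem.Str.startswith line "#" then pvSegP ls cur
    else if PySem.Str.startswith line "[" && PySem.Str.endswith line "]" then
      cur.toList ++ pvSegP ls (some (PySem.Str.strip (PySem.Str.slice line (some 1) (some (-1))), []))
    else
      match cur with
      | none => pvSegP ls none
      | some c => pvSegP ls (some (c.1, c.2 ++ [line]))

-- body lines of the current open block (stripped), up to the next header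
def pvPref : List String → List String
  | [] => []
  | raw :: ls =>
    let line := PySem.Str.strip raw
    if line == "" || PySem.Str.startswith line "#" then pvPref ls
    else if PySem.Str.startswith line "[" && PySem.Str.endswith line "]" then []
    else line :: pvPref ls

-- the remaining lines from the next header on
def pvSuff : List String → List String
  | [] => []
  | raw :: ls =>
    let line := PySem.Str.strip raw
    if line == "" || PySem.Str.startswith line "#" then pvSuff ls
    else if PySem.Str.startswith line "[" && PySem.Str.endswith line "]" then raw :: ls
    else pvSuff ls

theorem pvModifyInsert {κ ν : Type} [BEq κ] [LawfulBEq κ]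
    (d : PySem.Dict κ ν) (k : κ) (v d0 : ν) (f : ν → ν) :
    (d.insert k v).modify k d0 f = d.insert k (f v) := by
  simp [PySem.Dict.modify, pysem]

theorem pvSegFold (ls : List String) (closed : List (String × List String))
    (cur : Option (String × List String)) :
    (List.foldl pvSegStep (closed, cur) ls).1 ++ (List.foldl pvSegStep (closed, cur) ls).2.toList
      = closed ++ pvSegP ls cur := by
  induction ls generalizing closed cur with
  | nil => simp [pvSegP]
  | cons raw ls ih =>
    simp only [List.foldl_cons, pvSegStep, pvSegP]
    cases cur <;> split_ifs <;> simp [ih, List.append_assoc]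

theorem pvSegPSome (ls : List String) (s : String) (b : List String) :
    pvSegP ls (some (s, b)) = (s, b ++ pvPref ls) :: pvSegP (pvSuff ls) none := by
  induction ls generalizing b with
  | nil => simp [pvSegP, pvPref, pvSuff]
  | cons raw ls ih =>
    simp only [pvSegP, pvPref, pvSuff]
    split_ifs with h1 h2
    · exact ih b
    · simp only [pvSegP]
      simp at h1 h2
      simp [h1, h2]
    · simp [ih (b ++ [PySem.Str.strip raw])]

theorem pvMainSome (ls : List String) (c : PySem.Dict String String)
    (a : PySem.Dict String (PySem.Dict String String)) (s : String)
    (d : PySem.Dict String String) :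
    ((List.foldl pvAStep (c, a.insert s d, some s) ls).1,
     (List.foldl pvAStep (c, a.insert s d, some s) ls).2.1)
      = List.foldl pvFillStep
          ((List.foldl (pvKVStep s) (c, d) (pvPref ls)).1,
           a.insert s (List.foldl (pvKVStep s) (c, d) (pvPref ls)).2)
          (pvSegP (pvSuff ls) none) := by
  induction ls generalizing c a s d with
  | nil => simp [pvPref, pvSuff, pvSegP]
  | cons raw ls ih =>
    simp only [List.foldl_cons, pvAStep, pvPref, pvSuff]
    split_ifs with h1 h2 h3 h4
    · exact ih c a s d
    · rw [ih]
      simp only [pvSegP]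
      rw [if_neg h1, if_pos h2, pvSegPSome]
      simp [pvFillStep]
    · rw [ih]
      simp at h3 h4
      simp [pvKVStep, h3, h4]
    · rw [pvModifyInsert, ih]
      simp at h3 h4
      simp [pvKVStep, h3, h4]
    · rw [ih]
      simp at h3
      simp [pvKVStep, h3]

theorem pvMainNone (ls : List String) (c : PySem.Dict String String)
    (a : PySem.Dict String (PySem.Dict String String)) :
    ((List.foldl pvAStep (c, a, none) ls).1, (List.foldl pvAStep (c, a, none) ls).2.1)
      = List.foldl pvFillStep (c, a) (pvSegP ls none) := by
  induction ls generalizing c a with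
  | nil => simp [pvSegP]
  | cons raw ls ih =>
    simp only [List.foldl_cons, pvAStep, pvSegP]
    split_ifs with h1 h2
    · exact ih c a
    · rw [pvMainSome, pvSegPSome]
      simp [pvFillStep]
    · exact ih c a

-- ===== VERDICT (by name: the statement is the Claim_ definition above) =====
theorem convert_to_maps_spec : Claim_equal_convert_to_maps := by
  intro text _
  unfold Spec_convert_to_maps convert_to_maps convert_to_maps_alt
  have hseg := pvSegFold (PySem.Str.splitlines text) [] none
  have hmain := pvMainNone (PySem.Str.splitlines text) PySem.Dict.empty PySem.Dict.empty
  have h1 := congrArg Prod.fst hmain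
  have h2 := congrArg Prod.snd hmain
  simp only at h1 h2
  simp only [List.nil_append] at hseg
  simp only [hseg, h1, h2]
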